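-- pv_equiv track=rewrite | github.com/zerot69/Project-Euler | Problem 051-100/problem_059.py | evaluate
-- ===== SOURCE A (Python) =====
-- def evaluate(message):
--     common_words = ['the', 'and', 'that', 'with',
--                     'this', 'for', 'you', 'have', 'be', 'not', 'are']
--     words = message.split()
--     score = 0
--     for word in words:
--         if word.lower() in common_words:
--             score += 1
--     return score
-- ===== SOURCE B (Python) =====
-- COMMON = ('the', 'and', 'that', 'with',
--           'this', 'for', 'you', 'have', 'be', 'not', 'are')
--
--
-- def evaluate(message):
--     # single character-level scan: build each word, score it when it ends
--     score = 0
--     cur = []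
--     for ch in message:
--         if ch.isspace():
--             if cur:
--                 if ''.join(cur).lower() in COMMON:
--                     score += 1
--                 cur = []
--         else:
--             cur.append(ch)
--     if cur and ''.join(cur).lower() in COMMON:
--         score += 1
--     return score
-- ===== Notes on version B (the rewrite author's own statement) =====
-- stated objective: alternative
-- what changed: B replaces A's split-then-membership-test word loop by a single character-level scanner that assembles each word in place and scores it at every word boundary, never materialising the word list.
import Mathlib
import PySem

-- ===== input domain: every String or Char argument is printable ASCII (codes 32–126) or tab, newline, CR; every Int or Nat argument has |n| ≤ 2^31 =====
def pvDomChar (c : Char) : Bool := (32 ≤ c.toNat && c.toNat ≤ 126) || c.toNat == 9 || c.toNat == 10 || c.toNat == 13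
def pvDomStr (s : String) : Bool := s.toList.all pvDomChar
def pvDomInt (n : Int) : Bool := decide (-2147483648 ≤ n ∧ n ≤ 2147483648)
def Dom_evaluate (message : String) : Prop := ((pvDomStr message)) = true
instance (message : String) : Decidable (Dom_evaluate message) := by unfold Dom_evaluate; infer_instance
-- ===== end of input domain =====

-- B replaces A's split-then-membership word loop by a single character-level scanner
-- that assembles each word in place and scores it at each word boundary (alternative
-- decomposition, same exact result).

-- ===== PORT A =====
def evaluate (message : String) : Int :=
  let common_words : List String :=
    ["the", "and", "that", "with", "this", "for", "you", "have", "be", "not", "are"]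
  let words := PySem.Str.split₀ message
  words.foldl (fun score word =>
    if common_words.contains (PySem.Str.lower word) then score + 1 else score) 0

-- ===== PORT B =====
-- the Python tuple COMMON
def evalAltCommon : List String :=
  ["the", "and", "that", "with", "this", "for", "you", "have", "be", "not", "are"]

-- `if cur and ''.join(cur).lower() in COMMON: score += 1` (''.join over chars = String.ofList)
def evalAltFlush (cur : List Char) (score : Int) : Int :=
  if cur.isEmpty then score
  else if evalAltCommon.contains (PySem.Str.lower (String.ofList cur)) then score + 1
  else score

-- the `for ch in message:` loop, carried state (cur, score)
def evalAltGo : List Char → List Char → Int → Int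
  | [], cur, score => evalAltFlush cur score
  | c :: rest, cur, score =>
    if PySem.Chars.isspace c then evalAltGo rest [] (evalAltFlush cur score)
    else evalAltGo rest (cur ++ [c]) score

def evaluate_alt (message : String) : Int :=
  evalAltGo message.toList [] 0

-- ===== PRECONDITION & SPEC =====
def Spec_evaluate (message : String) (out : Int) : Prop := out = evaluate_alt message
instance (message : String) (out : Int) : Decidable (Spec_evaluate message out) := by unfold Spec_evaluate; infer_instance

-- ===== CLAIM (what is proved, stated in full; the proofs are below) =====
def Claim_equal_evaluate : Prop := ∀ (message : String), Dom_evaluate message → Spec_evaluate message (evaluate message)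

-- ===== LEMMAS AND PROOFS =====

-- the predicate both sides score a finished word with
def evalHit (w : List Char) : Bool :=
  evalAltCommon.contains (PySem.Str.lower (String.ofList w))

-- split₀.go is accumulator-append
theorem split₀_go_append (rest : List Char) :
    ∀ (cur : List Char) (acc : List (List Char)),
      PySem.Chars.split₀.go rest cur acc
        = acc.reverse ++ PySem.Chars.split₀.go rest cur [] := by
  induction rest with
  | nil =>
    intro cur acc
    by_cases h : cur.isEmpty
    · simp [PySem.Chars.split₀.go, h]
    · simp [PySem.Chars.split₀.go, h]
  | cons c rest ih =>
    intro cur acc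
    by_cases hs : PySem.Chars.isspace c
    · by_cases h : cur.isEmpty
      · simp only [PySem.Chars.split₀.go, hs, h, if_true]
        exact ih [] acc
      · simp only [PySem.Chars.split₀.go, hs, h, if_true, if_false, Bool.false_eq_true]
        rw [ih [] (cur.reverse :: acc), ih [] [cur.reverse]]
        simp
    · simp only [PySem.Chars.split₀.go, hs, Bool.false_eq_true, if_false]
      exact ih (c :: cur) acc

-- the scanner computes score + (number of words of split₀ hitting the common list)
theorem evalAltGo_eq_countP (rest : List Char) :
    ∀ (cur : List Char) (s : Int),
      evalAltGo rest cur s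
        = s + ((PySem.Chars.split₀.go rest cur.reverse []).countP evalHit : Int) := by
  induction rest with
  | nil =>
    intro cur s
    by_cases h : cur.isEmpty
    · simp [evalAltGo, evalAltFlush, PySem.Chars.split₀.go, h, List.isEmpty_reverse]
    · simp only [evalAltGo, evalAltFlush, h, if_false, Bool.false_eq_true,
        PySem.Chars.split₀.go, List.isEmpty_reverse, List.reverse_reverse,
        List.reverse_cons, List.reverse_nil, List.nil_append,
        List.countP_cons, List.countP_nil, evalHit]
      split_ifs <;> push_cast <;> omega
  | cons c rest ih =>
    intro cur s
    by_cases hs : PySem.Chars.isspace c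
    · by_cases h : cur.isEmpty
      · have hc : cur = [] := List.isEmpty_iff.mp h
        subst hc
        simp only [evalAltGo, evalAltFlush, hs, if_true, List.isEmpty_nil,
          PySem.Chars.split₀.go, List.reverse_nil]
        exact ih [] s
      · simp only [evalAltGo, evalAltFlush, hs, h, if_true, if_false, Bool.false_eq_true,
          PySem.Chars.split₀.go, List.isEmpty_reverse, List.reverse_reverse]
        rw [ih [] _, split₀_go_append rest [] [cur], List.countP_append]
        simp only [List.reverse_nil, List.countP_cons, List.countP_nil,
          List.reverse_cons, List.nil_append, evalHit]
        split_ifs <;> push_cast <;> omega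
    · simp only [evalAltGo, hs, Bool.false_eq_true, if_false, PySem.Chars.split₀.go]
      rw [ih (cur ++ [c]) s]
      simp

-- A's fold counts the common words
theorem foldA_eq_countP (L : List String) (ws : List String) (s : Int) :
    ws.foldl (fun score word =>
      if L.contains (PySem.Str.lower word) then score + 1 else score) s
      = s + ((ws.countP (fun w => L.contains (PySem.Str.lower w))) : Int) := by
  induction ws generalizing s with
  | nil => simp
  | cons w ws ih =>
    simp only [List.foldl_cons, List.countP_cons]
    rw [ih]
    split_ifs <;> push_cast <;> omega

theorem evaluate_spec' (message : String) : evaluate message = evaluate_alt message := by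
  unfold evaluate evaluate_alt
  rw [foldA_eq_countP, evalAltGo_eq_countP]
  simp only [PySem.Str.split₀, PySem.Chars.split₀, List.countP_map, List.reverse_nil,
    zero_add, Int.natCast_inj]
  apply List.countP_congr
  intro w _
  simp [evalHit, evalAltCommon, Function.comp, String.ofList]

-- ===== VERDICT (by name: the statement is the Claim_ definition above) =====
theorem evaluate_spec : Claim_equal_evaluate := by
  intro message _
  exact evaluate_spec' message
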